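-- pv_equiv track=rewrite | github.com/makinzm/atcoder_2 | python/arc173/a.py | solve
-- ===== SOURCE A (Python) =====
-- MAX_NUM = 10 ** 20
--
-- def _calculate_stacked_value(
--         stacked_value,
--         previous_base,
--         current_digit,
--         next_digit
--     ):
--     """自明的に 9 通りの数が選べない場合の合計数を計算する助けをする"""
--     # 次の文字が現在の文字より小さい場合
--     if next_digit != current_digit:
--         if next_digit < current_digit:
--             # [0:current_digit] \ [next_digit] の数
--             stacked_value = stacked_value + (current_digit - 1) * previous_base
--         else:
--             stacked_value = stacked_value + current_digit * previous_base
--     else: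
--         # [0:current_value) の数だけ自由に動ける (next_digit == current_digit であるため)
--         stacked_value = current_digit * previous_base
--     return stacked_value
--
-- def _get_same_digits_neq_number(x):
--     """Get the number of Neq Number that has the same digits as x and less than or equal to x"""
--     num_of_digits = len(str(x))
--
--     current_digit = x % 10
--     next_digit = (x // 10) % 10
--     # 自由に選べる場合の基数
--     previous_base = 1
--     # 自由に選べない場合の合計数 (初期値は x が選べると仮定した際の1通り)
--     stacked_value = 1
--     for i in range(num_of_digits):
--         stacked_value = _calculate_stacked_value(
--             stacked_value,
--             previous_base,
--             current_digit,
--             next_digit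
--         )
--         x //= 10
--         current_digit = x % 10
--         next_digit = (x // 10) % 10
--         previous_base *= 9
--     return stacked_value
--
-- def _get_less_digits_neq_number(x):
--     """Get the number of Neq Number that has less digits than x"""
--     num_of_digits = len(str(x))
--     ans = 0
--     for i in range(1, num_of_digits):
--         ans += 9 ** i
--     return ans
--
-- def _get_num_neq(x):
--     """Get the number of Neq Number that is less than or equal to x"""
--     return _get_same_digits_neq_number(x) + _get_less_digits_neq_number(x)
--
-- def solve(k):
--     """k番目のNeq Numberを求める"""
--     # out
--     min_num = 0
--     # safe
--     max_num = MAX_NUM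
--     while max_num - min_num > 1:
--         mid = (max_num + min_num) // 2
--         num_neq_of_mid = _get_num_neq(mid)
--         if num_neq_of_mid >= k:
--             max_num = mid
--         else:
--             min_num = mid
--
--     return max_num
-- ===== SOURCE B (Python) =====
-- def solve(k):
--     """k番目のNeq Numberを求める (direct construction, no binary search)"""
--     if k <= 0:
--         return 1
--     # find the digit length d: subtract the 9**i numbers of exactly i digits
--     d = 1
--     while k > 9 ** d:
--         k -= 9 ** d
--         d += 1
--     # 0-based rank within the length-d block, written in base 9 (LSB first)
--     r = k - 1
--     es = []
--     for _ in range(d):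
--         es.append(r % 9)
--         r //= 9
--     # build the number MSB first: digit = e-th smallest allowed digit
--     # (allowed: != previous digit; "previous digit" 0 before the first position,
--     #  which also rules out a leading zero)
--     n = 0
--     prev = 0
--     for e in reversed(es):
--         dig = e if e < prev else e + 1
--         n = n * 10 + dig
--         prev = dig
--     return n
-- ===== Notes on version B (the rewrite author's own statement) =====
-- stated objective: faster
-- what changed: A binary-searches the answer range, re-running a digit-DP count of Neq numbers at every probe; B computes the k-th Neq number directly: it strips whole blocks of shorter digit-lengths from k, writes the remaining rank in base nine, and maps each base-nine digit to the next admissible decimal digit, with no search and no counting.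
import Mathlib
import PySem

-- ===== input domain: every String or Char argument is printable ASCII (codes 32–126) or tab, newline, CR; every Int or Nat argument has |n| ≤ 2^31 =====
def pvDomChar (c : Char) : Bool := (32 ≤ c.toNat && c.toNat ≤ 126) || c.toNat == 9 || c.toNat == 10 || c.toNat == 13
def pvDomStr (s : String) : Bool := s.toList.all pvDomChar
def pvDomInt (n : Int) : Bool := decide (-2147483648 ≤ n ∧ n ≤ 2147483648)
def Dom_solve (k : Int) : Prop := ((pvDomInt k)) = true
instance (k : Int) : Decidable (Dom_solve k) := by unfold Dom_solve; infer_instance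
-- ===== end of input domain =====

-- B replaces A's 67-step binary search over [0, 10^20] (each step re-counting Neq numbers
-- digit by digit) by a direct construction of the k-th Neq number from k's base-9 expansion.

-- ===== PORT A =====
def MAX_NUM : Int := 10 ^ 20

def calculateStackedValue (stackedValue previousBase currentDigit nextDigit : Int) : Int :=
  if nextDigit ≠ currentDigit then
    if nextDigit < currentDigit then stackedValue + (currentDigit - 1) * previousBase
    else stackedValue + currentDigit * previousBase
  else currentDigit * previousBase

def getSameDigitsNeqNumber (x : Int) : Int :=
  let numOfDigits := PySem.Str.len (PySem.Int.toStr x)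
  let st := (List.range numOfDigits.toNat).foldl
    (fun (s : Int × Int × Int × Int × Int) _ =>
      let (x, currentDigit, nextDigit, previousBase, stackedValue) := s
      let stackedValue := calculateStackedValue stackedValue previousBase currentDigit nextDigit
      let x := PySem.Int.floordiv x 10
      (x, PySem.Int.mod x 10, PySem.Int.mod (PySem.Int.floordiv x 10) 10,
        previousBase * 9, stackedValue))
    (x, PySem.Int.mod x 10, PySem.Int.mod (PySem.Int.floordiv x 10) 10, 1, 1)
  st.2.2.2.2

def getLessDigitsNeqNumber (x : Int) : Int :=
  let numOfDigits := PySem.Str.len (PySem.Int.toStr x)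
  (PySem.List.pyRange 1 numOfDigits).foldl (fun ans i => ans + 9 ^ i.toNat) 0

def getNumNeq (x : Int) : Int :=
  getSameDigitsNeqNumber x + getLessDigitsNeqNumber x

def solveLoop (k minNum maxNum : Int) : Int :=
  if _h : maxNum - minNum > 1 then
    let mid := PySem.Int.floordiv (maxNum + minNum) 2
    if getNumNeq mid ≥ k then solveLoop k minNum mid
    else solveLoop k mid maxNum
  else maxNum
termination_by (maxNum - minNum).toNat
decreasing_by
  · have h1 : minNum + 1 ≤ PySem.Int.floordiv (maxNum + minNum) 2 :=
      (PySem.Int.le_floordiv_iff_mul_le (by norm_num)).2 (by omega)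
    have h2 : PySem.Int.floordiv (maxNum + minNum) 2 < maxNum :=
      (PySem.Int.floordiv_lt_iff_lt_mul (by norm_num)).2 (by omega)
    omega
  · have h1 : minNum + 1 ≤ PySem.Int.floordiv (maxNum + minNum) 2 :=
      (PySem.Int.le_floordiv_iff_mul_le (by norm_num)).2 (by omega)
    have h2 : PySem.Int.floordiv (maxNum + minNum) 2 < maxNum :=
      (PySem.Int.floordiv_lt_iff_lt_mul (by norm_num)).2 (by omega)
    omega

def solve (k : Int) : Int := solveLoop k 0 MAX_NUM

-- ===== PORT B =====
def findLen (k d : Int) : Int × Int :=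
  if _h : k > 9 ^ d.toNat then findLen (k - 9 ^ d.toNat) (d + 1) else (k, d)
termination_by k.toNat
decreasing_by
  have : (1 : Int) ≤ 9 ^ d.toNat := one_le_pow₀ (by norm_num)
  omega

def solve_alt (k : Int) : Int :=
  if k ≤ 0 then 1
  else
    let fd := findLen k 1
    let r := fd.1 - 1
    let es := ((List.range fd.2.toNat).foldl
      (fun (s : List Int × Int) _ =>
        (s.1 ++ [PySem.Int.mod s.2 9], PySem.Int.floordiv s.2 9)) ([], r)).1
    (es.reverse.foldl (fun (s : Int × Int) e =>
      let dig := if e < s.2 then e else e + 1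
      (s.1 * 10 + dig, dig)) (0, 0)).1

-- ===== PRECONDITION & SPEC =====
def Spec_solve (k : Int) (out : Int) : Prop := out = solve_alt k
instance (k : Int) (out : Int) : Decidable (Spec_solve k out) := by unfold Spec_solve; infer_instance

-- ===== CLAIM (what is proved, stated in full; the proofs are below) =====
def Claim_equal_solve : Prop := ∀ (k : Int), Dom_solve k → Spec_solve k (solve k)

-- ===== LEMMAS AND PROOFS =====

/-- `T9 p l` = number of digit strings `s` of the same length as `l` that are
lexicographically `≤ l`, have adjacent digits distinct, and first digit `≠ p`.
This is the quantity A's `_get_same_digits_neq_number` loop accumulates. -/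
def T9 (p : Int) : List Int → Int
  | [] => 1
  | d :: es => (d - if p < d then 1 else 0) * 9 ^ es.length + (if d = p then 0 else T9 d es)

/-- all entries are decimal digits -/
def OkD (l : List Int) : Prop := ∀ d ∈ l, 0 ≤ d ∧ d ≤ 9

/-- all entries are base-9 digits -/
def OkE (l : List Int) : Prop := ∀ e ∈ l, 0 ≤ e ∧ e ≤ 8

/-- adjacent entries distinct, first entry ≠ p -/
def Valid (p : Int) : List Int → Prop
  | [] => True
  | d :: es => d ≠ p ∧ Valid d es

/-- value of a digit list, most significant first, in base b -/
def pval (b : Int) : List Int → Int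
  | [] => 0
  | d :: l => d * b ^ l.length + pval b l

/-- B's digit map: `e`-th smallest digit of {0..9} \ {p}, applied along the list -/
def build (p : Int) : List Int → List Int
  | [] => []
  | e :: l => (if e < p then e else e + 1) :: build (if e < p then e else e + 1) l

/-- least-significant-first base-b digits, n of them -/
def dLSB (b : Int) : Nat → Int → List Int
  | 0, _ => []
  | n+1, x => x % b :: dLSB b n (x / b)

/-- Σ_{i=1}^{n} 9^i : the number of Neq numbers with at most n digits -/
def S : Nat → Int
  | 0 => 0
  | n+1 => S n + 9 ^ (n+1)

lemma S_nonneg (n : Nat) : 0 ≤ S n := by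
  induction n with
  | zero => simp [S]
  | succ n ih => simp only [S]; positivity

lemma S_mono {m n : Nat} (h : m ≤ n) : S m ≤ S n := by
  induction n with
  | zero =>
    have hm : m = 0 := by omega
    simp [hm]
  | succ n ih =>
    by_cases h' : m = n + 1
    · simp [h']
    · have h2 := ih (by omega)
      have h3 : (0:Int) ≤ 9 ^ (n+1) := by positivity
      calc S m ≤ S n := h2
        _ ≤ S (n+1) := by simp only [S]; omega

lemma T9_nonneg {p : Int} {l : List Int} (hp : 0 ≤ p) (hl : OkD l) : 0 ≤ T9 p l := by
  induction l generalizing p with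
  | nil => simp [T9]
  | cons d es ih =>
    have hd := hl d (by simp)
    have hes : OkD es := fun e he => hl e (by simp [he])
    have h1 : (0:Int) ≤ (d - if p < d then 1 else 0) * 9 ^ es.length := by
      have : (0:Int) ≤ d - if p < d then 1 else 0 := by split_ifs <;> omega
      positivity
    have h2 : (0:Int) ≤ if d = p then 0 else T9 d es := by
      split_ifs with h
      · exact le_rfl
      · exact ih hd.1 hes
    simp only [T9]; omega

lemma T9_le {p : Int} {l : List Int} (hp : p ≤ 9) (hl : OkD l) : T9 p l ≤ 9 ^ l.length := by
  induction l generalizing p with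
  | nil => simp [T9]
  | cons d es ih =>
    have hd := hl d (by simp)
    have hes : OkD es := fun e he => hl e (by simp [he])
    have hpow : (0:Int) < 9 ^ es.length := by positivity
    have hih : T9 d es ≤ 9 ^ es.length := ih (p := d) hd.2 hes
    simp only [T9, List.length_cons, pow_succ]
    by_cases hdp : d = p
    · rw [if_pos hdp, if_neg (show ¬ p < d by omega)]
      nlinarith
    · rw [if_neg hdp]
      by_cases hlt : p < d
      · rw [if_pos hlt]; nlinarith
      · rw [if_neg hlt]
        rcases (by omega : d ≤ 8 ∨ d = 9) with h | h
        · nlinarith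
        · exfalso; exact hdp (by omega)

lemma T9_pos {p : Int} {l : List Int} (hp : 0 ≤ p) (hl : OkD l) (hv : Valid p l) :
    1 ≤ T9 p l := by
  induction l generalizing p with
  | nil => simp [T9]
  | cons d es ih =>
    have hd := hl d (by simp)
    have hes : OkD es := fun e he => hl e (by simp [he])
    obtain ⟨hdp, hv'⟩ := hv
    have hpow : (0:Int) < 9 ^ es.length := by positivity
    have h1 : (0:Int) ≤ (d - if p < d then 1 else 0) * 9 ^ es.length := by
      have : (0:Int) ≤ d - if p < d then 1 else 0 := by split_ifs <;> omega
      positivity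
    have h2 : 1 ≤ T9 d es := ih hd.1 hes hv'
    simp only [T9, if_neg hdp]; omega

lemma T9_mono_le {p : Int} : ∀ {es fs : List Int}, 0 ≤ p → es.length = fs.length →
    OkD es → OkD fs → List.Lex (· < ·) es fs → T9 p es ≤ T9 p fs := by
  intro es fs hp hlen ho1 ho2 hlex
  induction hlex generalizing p with
  | nil => simp at hlen
  | @rel a l1 b l2 hab =>
    have ha := ho1 a (by simp)
    have hb := ho2 b (by simp)
    have hl1 : OkD l1 := fun e he => ho1 e (by simp [he])
    have hl2 : OkD l2 := fun e he => ho2 e (by simp [he])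
    have hlen' : l1.length = l2.length := by simpa using hlen
    have h1 : T9 a l1 ≤ 9 ^ l2.length := hlen' ▸ T9_le ha.2 hl1
    have h2 : 0 ≤ T9 b l2 := T9_nonneg hb.1 hl2
    have h0 : (0:Int) < 9 ^ l2.length := by positivity
    have hstep : T9 p (a :: l1) ≤
        ((a - if p < a then 1 else 0) + (if a = p then 0 else 1)) * 9 ^ l2.length := by
      simp only [T9, hlen']
      by_cases hap : a = p
      · simp only [if_pos hap]
        exact le_of_eq (by ring)
      · simp only [if_neg hap]; nlinarith
    have hkey : (a - if p < a then 1 else 0) + (if a = p then 0 else 1)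
        ≤ b - if p < b then 1 else 0 := by split_ifs <;> omega
    have hmul := mul_le_mul_of_nonneg_right hkey (le_of_lt h0)
    have hlast : (b - if p < b then 1 else 0) * 9 ^ l2.length ≤ T9 p (b :: l2) := by
      simp only [T9]
      have hB : (0:Int) ≤ if b = p then 0 else T9 b l2 := by
        split_ifs
        · exact le_rfl
        · exact h2
      linarith
    linarith
  | @cons a l1 l2 h ih =>
    have ha := ho2 a (by simp)
    have hl1 : OkD l1 := fun e he => ho1 e (by simp [he])
    have hl2 : OkD l2 := fun e he => ho2 e (by simp [he])
    have hlen' : l1.length = l2.length := by simpa using hlen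
    have hih := ih (p := a) ha.1 hlen' hl1 hl2
    simp only [T9, hlen']
    by_cases hap : a = p
    · simp [hap]
    · simp only [if_neg hap]; omega

lemma T9_mono_lt {p : Int} : ∀ {es fs : List Int}, 0 ≤ p → es.length = fs.length →
    OkD es → OkD fs → Valid p fs → List.Lex (· < ·) es fs → T9 p es < T9 p fs := by
  intro es fs hp hlen ho1 ho2 hv hlex
  induction hlex generalizing p with
  | nil => simp at hlen
  | @rel a l1 b l2 hab =>
    have ha := ho1 a (by simp)
    have hb := ho2 b (by simp)
    have hl1 : OkD l1 := fun e he => ho1 e (by simp [he])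
    have hl2 : OkD l2 := fun e he => ho2 e (by simp [he])
    have hlen' : l1.length = l2.length := by simpa using hlen
    obtain ⟨hbp, hv2⟩ := hv
    have h1 : T9 a l1 ≤ 9 ^ l2.length := hlen' ▸ T9_le ha.2 hl1
    have h2 : 1 ≤ T9 b l2 := T9_pos hb.1 hl2 hv2
    have h0 : (0:Int) < 9 ^ l2.length := by positivity
    have hstep : T9 p (a :: l1) ≤
        ((a - if p < a then 1 else 0) + (if a = p then 0 else 1)) * 9 ^ l2.length := by
      simp only [T9, hlen']
      by_cases hap : a = p
      · simp only [if_pos hap]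
        exact le_of_eq (by ring)
      · simp only [if_neg hap]; nlinarith
    have hkey : (a - if p < a then 1 else 0) + (if a = p then 0 else 1)
        ≤ b - if p < b then 1 else 0 := by split_ifs <;> omega
    have hmul := mul_le_mul_of_nonneg_right hkey (le_of_lt h0)
    have hlast : (b - if p < b then 1 else 0) * 9 ^ l2.length + 1 ≤ T9 p (b :: l2) := by
      simp only [T9, if_neg hbp]
      linarith
    linarith
  | @cons a l1 l2 h ih =>
    have ha := ho2 a (by simp)
    have hl1 : OkD l1 := fun e he => ho1 e (by simp [he])
    have hl2 : OkD l2 := fun e he => ho2 e (by simp [he])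
    have hlen' : l1.length = l2.length := by simpa using hlen
    obtain ⟨hap, hv2⟩ := hv
    have hih := ih (p := a) ha.1 hlen' hl1 hl2 hv2
    simp only [T9, hlen', if_neg hap]
    omega

lemma build_length (p : Int) (l : List Int) : (build p l).length = l.length := by
  induction l generalizing p with
  | nil => rfl
  | cons e l ih => simp [build, ih]

lemma build_ok {p : Int} {l : List Int} (hp : 0 ≤ p) (hl : OkE l) : OkD (build p l) := by
  induction l generalizing p with
  | nil => intro d h; simp [build] at h
  | cons e l ih =>
    have he := hl e (by simp)
    have hl' : OkE l := fun a ha => hl a (by simp [ha])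
    intro d hd
    simp only [build, List.mem_cons] at hd
    rcases hd with h | h
    · subst h; split_ifs <;> omega
    · have hdig : (0:Int) ≤ if e < p then e else e + 1 := by split_ifs <;> omega
      exact ih hdig hl' d h

lemma build_valid {p : Int} {l : List Int} (hp : 0 ≤ p) (hl : OkE l) : Valid p (build p l) := by
  induction l generalizing p with
  | nil => trivial
  | cons e l ih =>
    have he := hl e (by simp)
    have hl' : OkE l := fun a ha => hl a (by simp [ha])
    have hdig : (0:Int) ≤ if e < p then e else e + 1 := by split_ifs <;> omega
    refine ⟨?_, ih hdig hl'⟩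
    split_ifs with h <;> omega

lemma T9_build {p : Int} {l : List Int} (hp : 0 ≤ p) (hl : OkE l) :
    T9 p (build p l) = pval 9 l + 1 := by
  induction l generalizing p with
  | nil => simp [T9, build, pval]
  | cons e l ih =>
    have he := hl e (by simp)
    have hl' : OkE l := fun a ha => hl a (by simp [ha])
    set dig : Int := if e < p then e else e + 1 with hdig
    have hdig0 : 0 ≤ dig := by rw [hdig]; split_ifs <;> omega
    have hne : dig ≠ p := by rw [hdig]; split_ifs <;> omega
    have hsub : dig - (if p < dig then 1 else 0) = e := by
      rw [hdig]; split_ifs <;> omega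
    simp only [build, ← hdig, T9, pval, if_neg hne, hsub, build_length]
    rw [ih hdig0 hl']
    ring

lemma pval_append (b : Int) (l : List Int) (e : Int) :
    pval b (l ++ [e]) = pval b l * b + e := by
  induction l with
  | nil => simp [pval]
  | cons d l ih => simp only [List.cons_append, pval, List.length_append, List.length_cons,
      List.length_nil, ih]; ring

lemma pval_nonneg {b : Int} {l : List Int} (hb : 0 ≤ b) (hl : ∀ d ∈ l, 0 ≤ d) :
    0 ≤ pval b l := by
  induction l with
  | nil => simp [pval]
  | cons d l ih =>
    have hd := hl d (by simp)
    have := ih (fun a ha => hl a (by simp [ha]))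
    have : (0:Int) ≤ d * b ^ l.length := by positivity
    simp only [pval]; omega

lemma pval_lt {b : Int} {l : List Int} (hb : 0 < b) (hl : ∀ d ∈ l, 0 ≤ d ∧ d ≤ b - 1) :
    pval b l < b ^ l.length := by
  induction l with
  | nil => simp [pval]
  | cons d l ih =>
    have hd := hl d (by simp)
    have hih := ih (fun a ha => hl a (by simp [ha]))
    have hpow : (0:Int) < b ^ l.length := by positivity
    simp only [pval, List.length_cons, pow_succ]
    nlinarith

lemma dLSB_length (b : Int) (n : Nat) (x : Int) : (dLSB b n x).length = n := by
  induction n generalizing x with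
  | zero => rfl
  | succ n ih => simp [dLSB, ih]

lemma dLSB_ok {b : Int} (hb : 0 < b) (n : Nat) (x : Int) :
    ∀ d ∈ dLSB b n x, 0 ≤ d ∧ d ≤ b - 1 := by
  induction n generalizing x with
  | zero => intro d h; simp [dLSB] at h
  | succ n ih =>
    intro d hd
    simp only [dLSB, List.mem_cons] at hd
    rcases hd with h | h
    · subst h
      exact ⟨Int.emod_nonneg x (by omega), by have := Int.emod_lt_of_pos x hb; omega⟩
    · exact ih _ d h

lemma dLSB_succ_top {b : Int} (hb : 0 < b) (n : Nat) :
    ∀ x : Int, 0 ≤ x → dLSB b (n+1) x = dLSB b n x ++ [x / b ^ n % b] := by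
  induction n with
  | zero =>
    intro x hx
    simp [dLSB, pow_zero]
  | succ n ih =>
    intro x hx
    have hq : 0 ≤ x / b := Int.ediv_nonneg hx (le_of_lt hb)
    have hdd : x / b / b ^ n = x / b ^ (n+1) := by
      rw [Int.ediv_ediv_of_nonneg (le_of_lt hb), ← pow_succ']
    show x % b :: dLSB b (n+1) (x / b) = (x % b :: dLSB b n (x / b)) ++ [x / b ^ (n+1) % b]
    rw [ih (x / b) hq, hdd]
    simp

lemma pval_rev_dLSB {b : Int} (hb : 0 < b) (n : Nat) :
    ∀ x : Int, 0 ≤ x → pval b ((dLSB b n x).reverse) = x % b ^ n := by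
  induction n with
  | zero => intro x hx; simp [dLSB, pval]
  | succ n ih =>
    intro x hx
    have hq : 0 ≤ x / b := Int.ediv_nonneg hx (le_of_lt hb)
    have hdd : x / b / b ^ n = x / b ^ (n+1) := by
      rw [Int.ediv_ediv_of_nonneg (le_of_lt hb), ← pow_succ']
    show pval b ((x % b :: dLSB b n (x / b)).reverse) = x % b ^ (n+1)
    rw [List.reverse_cons, pval_append, ih (x / b) hq,
      Int.emod_def, Int.emod_def, Int.emod_def, ← hdd]
    ring

lemma dLSB_pval {b : Int} (hb : 0 < b) {l : List Int} (hl : ∀ d ∈ l, 0 ≤ d ∧ d ≤ b - 1) :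
    (dLSB b l.length (pval b l)).reverse = l := by
  induction l using List.reverseRecOn with
  | nil => simp [dLSB, pval]
  | append_singleton l e ih =>
    have he := hl e (by simp)
    have hl' : ∀ d ∈ l, 0 ≤ d ∧ d ≤ b - 1 := fun d hd => hl d (by simp [hd])
    have hp0 : 0 ≤ pval b l := pval_nonneg (le_of_lt hb) (fun d hd => (hl' d hd).1)
    have hmod : (pval b l * b + e) % b = e := by
      rw [add_comm, mul_comm, Int.add_mul_emod_self_left]
      exact Int.emod_eq_of_lt he.1 (by omega)
    have hdiv : (pval b l * b + e) / b = pval b l := by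
      rw [add_comm, Int.add_mul_ediv_right _ _ (by omega : b ≠ 0)]
      rw [Int.ediv_eq_zero_of_lt he.1 (by omega)]
      ring
    rw [pval_append, List.length_append, List.length_singleton]
    show (dLSB b (l.length + 1) (pval b l * b + e)).reverse = l ++ [e]
    simp only [dLSB, hmod, hdiv, List.reverse_cons, ih hl']

/-- digit lists of equal length compare lexicographically like their values -/
lemma lex_of_pval_lt : ∀ {l l' : List Int}, OkD l → OkD l' → l.length = l'.length →
    pval 10 l < pval 10 l' → List.Lex (· < ·) l l' := by
  intro l
  induction l with
  | nil =>
    intro l' hl hl' hlen hval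
    cases l' with
    | nil => simp [pval] at hval
    | cons d t => simp at hlen
  | cons d t ih =>
    intro l' hl hl' hlen hval
    cases l' with
    | nil => simp at hlen
    | cons d' t' =>
      have hd := hl d (by simp)
      have hd' := hl' d' (by simp)
      have ht : OkD t := fun e he => hl e (by simp [he])
      have ht' : OkD t' := fun e he => hl' e (by simp [he])
      have hlen' : t.length = t'.length := by simpa using hlen
      rcases lt_trichotomy d d' with h | h | h
      · exact List.Lex.rel h
      · subst h
        refine List.Lex.cons (ih ht ht' hlen' ?_)
        simp only [pval, hlen'] at hval
        omega
      · exfalso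
        have h1 : pval 10 t' < 10 ^ t'.length :=
          pval_lt (by norm_num) (fun e he => by have := ht' e he; omega)
        have h2 : 0 ≤ pval 10 t := pval_nonneg (by norm_num) (fun e he => (ht e he).1)
        have h0 : (0:Int) < 10 ^ t'.length := by positivity
        simp only [pval, hlen'] at hval
        nlinarith

lemma toDigitsCore_len : ∀ (f : Nat), ∀ (n : Nat) (l : List Char), n < f →
    (Nat.toDigitsCore 10 f n l).length = l.length + Nat.log 10 n + 1 := by
  intro f
  induction f with
  | zero => intro n l h; omega
  | succ f ih =>
    intro n l h
    simp only [Nat.toDigitsCore]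
    by_cases h10 : n / 10 = 0
    · have hn : n < 10 := Nat.lt_of_div_eq_zero (by norm_num) h10
      have hl : Nat.log 10 n = 0 := Nat.log_eq_zero_iff.2 (Or.inl hn)
      simp [h10, hl]
    · simp only [h10, if_false]
      rw [ih (n/10) _ (by omega)]
      have hlog : Nat.log 10 (n/10) = Nat.log 10 n - 1 := Nat.log_div_base 10 n
      have h10' : 10 ≤ n := by omega
      have hp := Nat.log_pos (b := 10) (by norm_num) h10'
      simp only [List.length_cons]
      omega

/-- length of `str(x)` for positive `x` -/
lemma strlen_eq {x : Int} (hx : 1 ≤ x) :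
    PySem.Str.len (PySem.Int.toStr x) = ((Nat.log 10 x.toNat + 1 : Nat) : Int) := by
  have h0 : ¬ x < 0 := by omega
  rw [PySem.Str.len_eq, PySem.Int.toList_toStr]
  have hch : PySem.Int.toChars x = Nat.toDigits 10 x.toNat := by
    simp [PySem.Int.toChars, h0]
  rw [hch]
  have := toDigitsCore_len (x.toNat + 1) x.toNat [] (by omega)
  simp only [Nat.toDigits] at *
  simp [this]

/-- A's same-digit loop, characterized: state after n iterations -/
lemma sameLoop_inv {x : Int} (hx : 0 ≤ x) (n : Nat) :
    (List.range n).foldl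
      (fun (s : Int × Int × Int × Int × Int) _ =>
        let (x, currentDigit, nextDigit, previousBase, stackedValue) := s
        let stackedValue := calculateStackedValue stackedValue previousBase currentDigit nextDigit
        let x := PySem.Int.floordiv x 10
        (x, PySem.Int.mod x 10, PySem.Int.mod (PySem.Int.floordiv x 10) 10,
          previousBase * 9, stackedValue))
      (x, PySem.Int.mod x 10, PySem.Int.mod (PySem.Int.floordiv x 10) 10, 1, 1)
    = (x / 10 ^ n, x / 10 ^ n % 10, x / 10 ^ (n+1) % 10, 9 ^ n,
        T9 (x / 10 ^ n % 10) ((dLSB 10 n x).reverse)) := by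
  induction n with
  | zero =>
    simp only [List.range_zero, List.foldl_nil, pow_zero, pow_succ, one_mul, Int.ediv_one,
      PySem.Int.mod_eq_emod_of_pos (by norm_num : (0:Int) < 10),
      PySem.Int.floordiv_eq_ediv_of_pos (by norm_num : (0:Int) < 10), dLSB, List.reverse_nil, T9]
  | succ n ih =>
    rw [List.range_succ, List.foldl_append, ih, List.foldl_cons, List.foldl_nil]
    have hxn : 0 ≤ x / 10 ^ n := Int.ediv_nonneg hx (by positivity)
    have hdd : x / 10 ^ n / 10 = x / 10 ^ (n+1) := by
      rw [Int.ediv_ediv_of_nonneg (by positivity), ← pow_succ]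
    have hdd2 : x / 10 ^ (n+1) / 10 = x / 10 ^ (n+2) := by
      rw [Int.ediv_ediv_of_nonneg (by positivity), ← pow_succ]
    have hlen : ((dLSB 10 n x).reverse).length = n := by
      rw [List.length_reverse, dLSB_length]
    have htop : (dLSB 10 (n+1) x).reverse = (x / 10 ^ n % 10) :: (dLSB 10 n x).reverse := by
      rw [dLSB_succ_top (by norm_num) n x hx, List.reverse_append]
      simp
    simp only [PySem.Int.mod_eq_emod_of_pos (by norm_num : (0:Int) < 10),
      PySem.Int.floordiv_eq_ediv_of_pos (by norm_num : (0:Int) < 10), hdd, hdd2]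
    refine Prod.ext rfl (Prod.ext rfl (Prod.ext rfl (Prod.ext (by ring) ?_)))
    show calculateStackedValue (T9 (x / 10 ^ n % 10) (dLSB 10 n x).reverse) (9 ^ n)
        (x / 10 ^ n % 10) (x / 10 ^ (n+1) % 10) = T9 (x / 10 ^ (n+1) % 10) (dLSB 10 (n+1) x).reverse
    rw [htop]
    unfold calculateStackedValue
    simp only [T9, hlen]
    set c := x / 10 ^ n % 10
    set p := x / 10 ^ (n+1) % 10
    by_cases hcp : p = c
    · simp [hcp]
    · rw [if_pos hcp, if_neg (Ne.symm hcp)]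
      by_cases hlt : p < c
      · rw [if_pos hlt, if_pos hlt]; ring
      · rw [if_neg hlt, if_neg hlt]; ring

lemma lessLoop : ∀ n : Nat,
    (PySem.List.pyRange 1 ((n:Int)+1)).foldl (fun ans i => ans + 9 ^ i.toNat) 0 = S n := by
  intro n
  induction n with
  | zero => norm_num [S]
  | succ n ih =>
    have h1 : (1:Int) ≤ (n:Int) + 1 := by omega
    have hc : ((n+1 : Nat) : Int) + 1 = ((n:Int)+1)+1 := by push_cast; ring
    rw [hc, PySem.List.pyRange_one_succ_right h1, List.foldl_append, ih,
      List.foldl_cons, List.foldl_nil]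
    have ht : ((n:Int)+1).toNat = n+1 := by omega
    rw [ht]
    simp [S]

lemma range9_fold : ∀ (n : Nat) (r : Int), 0 ≤ r →
    (List.range n).foldl
      (fun (s : List Int × Int) _ =>
        (s.1 ++ [PySem.Int.mod s.2 9], PySem.Int.floordiv s.2 9)) ([], r)
    = (dLSB 9 n r, r / 9 ^ n) := by
  intro n r hr
  induction n with
  | zero => simp [dLSB]
  | succ n ih =>
    rw [List.range_succ, List.foldl_append, ih, List.foldl_cons, List.foldl_nil]
    have hdd : r / 9 ^ n / 9 = r / 9 ^ (n+1) := by
      rw [Int.ediv_ediv_of_nonneg (by positivity), ← pow_succ]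
    rw [PySem.Int.mod_eq_emod_of_pos (by norm_num : (0:Int) < 9),
        PySem.Int.floordiv_eq_ediv_of_pos (by norm_num : (0:Int) < 9), hdd,
        ← dLSB_succ_top (by norm_num : (0:Int) < 9) n r hr]

lemma build_fold : ∀ (l : List Int) (a p : Int),
    (l.foldl (fun (s : Int × Int) e =>
      let dig := if e < s.2 then e else e + 1
      (s.1 * 10 + dig, dig)) (a, p)).1 = a * 10 ^ l.length + pval 10 (build p l) := by
  intro l
  induction l with
  | nil => intro a p; simp [pval, build]
  | cons e l ih =>
    intro a p
    simp only [List.foldl_cons]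
    rw [ih]
    simp only [build, pval, build_length, List.length_cons]
    ring

/-- A's counting function, characterized for x ≥ 1 -/
lemma getNumNeq_eq {x : Int} (hx : 1 ≤ x) :
    getNumNeq x = T9 0 ((dLSB 10 (Nat.log 10 x.toNat + 1) x).reverse) + S (Nat.log 10 x.toNat) := by
  have hx0 : 0 ≤ x := by omega
  set m := Nat.log 10 x.toNat with hm
  have hlt : x < 10 ^ (m+1) := by
    have h := Nat.lt_pow_succ_log_self (b := 10) (by norm_num) x.toNat
    calc x = (x.toNat : Int) := (Int.toNat_of_nonneg hx0).symm
      _ < ((10 ^ (m+1) : Nat) : Int) := by exact_mod_cast h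
      _ = 10 ^ (m+1) := by push_cast; ring
  have hstr := strlen_eq hx
  unfold getNumNeq getSameDigitsNeqNumber getLessDigitsNeqNumber
  rw [hstr]
  dsimp only
  have htn : (((m+1 : Nat) : Int)).toNat = m + 1 := by omega
  rw [htn, sameLoop_inv hx0 (m+1)]
  have hdiv0 : x / 10 ^ (m+1) = 0 := Int.ediv_eq_zero_of_lt hx0 hlt
  have hc : ((m+1 : Nat) : Int) = (m : Int) + 1 := by push_cast; ring
  rw [hc, lessLoop m]
  simp [hdiv0]

lemma findLen_spec : ∀ (n : Nat) (k d : Int), k.toNat ≤ n → 1 ≤ k → 1 ≤ d →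
    1 ≤ (findLen k d).1 ∧ (findLen k d).1 ≤ 9 ^ ((findLen k d).2.toNat) ∧
    d ≤ (findLen k d).2 ∧
    (findLen k d).1 + S ((findLen k d).2.toNat - 1) = k + S (d.toNat - 1) := by
  intro n
  induction n with
  | zero => intro k d hkn hk hd; exfalso; omega
  | succ n ih =>
    intro k d hkn hk hd
    rw [findLen.eq_def]
    by_cases hgt : k > 9 ^ d.toNat
    · rw [dif_pos hgt]
      have hpow1 : (1:Int) ≤ 9 ^ d.toNat := one_le_pow₀ (by norm_num)
      have h1 : 1 ≤ k - 9 ^ d.toNat := by omega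
      have hkn' : (k - 9 ^ d.toNat).toNat ≤ n := by omega
      obtain ⟨a1, a2, a3, a4⟩ := ih (k - 9 ^ d.toNat) (d + 1) hkn' h1 (by omega)
      refine ⟨a1, a2, by omega, ?_⟩
      obtain ⟨u, hu⟩ : ∃ u, d.toNat = u + 1 := ⟨d.toNat - 1, by omega⟩
      have hdt : (d+1).toNat - 1 = d.toNat := by omega
      have hS : S d.toNat = S (d.toNat - 1) + 9 ^ d.toNat := by
        rw [hu]; simp [S]
      rw [hdt] at a4
      linarith [a4, hS]
    · rw [dif_neg hgt]
      refine ⟨hk, ?_, le_rfl, rfl⟩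
      show k ≤ 9 ^ d.toNat
      omega

lemma solve_alt_eq {k : Int} (hk : 1 ≤ k) :
    solve_alt k =
      pval 10 (build 0 ((dLSB 9 (findLen k 1).2.toNat ((findLen k 1).1 - 1)).reverse)) := by
  obtain ⟨h1, h2, h3, h4⟩ := findLen_spec k.toNat k 1 le_rfl hk (by norm_num)
  have hr : 0 ≤ (findLen k 1).1 - 1 := by omega
  unfold solve_alt
  rw [if_neg (by omega)]
  dsimp only
  rw [range9_fold _ _ hr]
  dsimp only
  rw [build_fold]
  simp

/-- the crux: A's count at x is ≥ k exactly when x is at least B's answer -/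
lemma crux {k : Int} (hk : k ≤ 2^31) :
    1 ≤ solve_alt k ∧ solve_alt k ≤ 10 ^ 20 ∧
    ∀ x : Int, 1 ≤ x → (getNumNeq x ≥ k ↔ solve_alt k ≤ x) := by
  by_cases hk0 : k ≤ 0
  · have hB : solve_alt k = 1 := by unfold solve_alt; rw [if_pos hk0]
    refine ⟨by omega, by norm_num [hB], ?_⟩
    intro x hx
    rw [hB]
    constructor
    · intro _; exact hx
    · intro _
      rw [ge_iff_le, getNumNeq_eq hx]
      have hok : OkD ((dLSB 10 (Nat.log 10 x.toNat + 1) x).reverse) := by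
        intro d hd
        have := dLSB_ok (by norm_num : (0:Int) < 10) _ x d (List.mem_reverse.mp hd)
        omega
      have h1 : 0 ≤ T9 0 ((dLSB 10 (Nat.log 10 x.toNat + 1) x).reverse) := T9_nonneg le_rfl hok
      have h2 := S_nonneg (Nat.log 10 x.toNat)
      omega
  · have hk1 : 1 ≤ k := by omega
    obtain ⟨hk'1, hk'9, hd1, heq⟩ := findLen_spec k.toNat k 1 le_rfl hk1 (by norm_num)
    set k' := (findLen k 1).1 with hk'def
    set d' := (findLen k 1).2 with hd'def
    set dt := d'.toNat with hdtdef
    have hdt1 : 1 ≤ dt := by omega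
    have heq' : k' + S (dt - 1) = k := by
      have : ((1:Int).toNat - 1) = 0 := by norm_num
      rw [this] at heq
      simpa [S] using heq
    have hS10 : S 10 = 3922632450 := by norm_num [S]
    have hdt10 : dt ≤ 10 := by
      by_contra hcon
      have h10 : 10 ≤ dt - 1 := by omega
      have := S_mono h10
      omega
    set r := k' - 1 with hrdef
    have hr0 : 0 ≤ r := by omega
    have hr9 : r < 9 ^ dt := by
      calc r < k' := by omega
        _ ≤ 9 ^ dt := hk'9
    set es9 := (dLSB 9 dt r).reverse with hes9
    have hesOk : OkE es9 := by
      intro e he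
      have := dLSB_ok (by norm_num : (0:Int) < 9) dt r e (List.mem_reverse.mp he)
      omega
    have hlen9 : es9.length = dt := by rw [hes9, List.length_reverse, dLSB_length]
    have hpv9 : pval 9 es9 = r := by
      rw [hes9, pval_rev_dLSB (by norm_num) dt r hr0]
      exact Int.emod_eq_of_lt hr0 hr9
    set LB := build 0 es9 with hLB
    have hLBok : OkD LB := build_ok le_rfl hesOk
    have hLBval : Valid 0 LB := build_valid le_rfl hesOk
    have hLBlen : LB.length = dt := by rw [hLB, build_length, hlen9]
    have hT9LB : T9 0 LB = k' := by
      rw [hLB, T9_build le_rfl hesOk, hpv9]; omega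
    set B := pval 10 LB with hBdef
    have hBeq : solve_alt k = B := by
      rw [solve_alt_eq hk1]
    have hBlt : B < 10 ^ dt := by
      rw [hBdef, ← hLBlen]
      exact pval_lt (by norm_num) (fun d hd => by have := hLBok d hd; omega)
    have hBge : 10 ^ (dt - 1) ≤ B := by
      cases hLBl : LB with
      | nil => rw [hLBl] at hLBlen; simp at hLBlen; omega
      | cons h t =>
        have hh : 0 ≤ h ∧ h ≤ 9 := hLBok h (by rw [hLBl]; simp)
        have hh0 : h ≠ 0 := by
          have := hLBval
          rw [hLBl] at this
          exact this.1
        have ht0 : 0 ≤ pval 10 t :=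
          pval_nonneg (by norm_num) (fun d hd => (hLBok d (by rw [hLBl]; simp [hd])).1)
        have htlen : t.length = dt - 1 := by
          rw [hLBl] at hLBlen; simp at hLBlen; omega
        rw [hBdef, hLBl]
        simp only [pval, htlen]
        have h1 : (1:Int) ≤ h := by omega
        nlinarith [pow_pos (by norm_num : (0:Int) < 10) (dt - 1)]
    have hB1 : 1 ≤ B := by
      have : (1:Int) ≤ 10 ^ (dt - 1) := one_le_pow₀ (by norm_num)
      omega
    have hB0 : 0 ≤ B := by omega
    -- Nat-side bounds for the log computation
    have hBN1 : 10 ^ (dt - 1) ≤ B.toNat := by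
      have h := hBge
      have h2 : ((10 ^ (dt - 1) : Nat) : Int) ≤ B := by push_cast; exact h
      omega
    have hBN2 : B.toNat < 10 ^ dt := by
      have h := hBlt
      have h2 : B < ((10 ^ dt : Nat) : Int) := by push_cast; exact h
      omega
    have hlogB : Nat.log 10 B.toNat = dt - 1 :=
      Nat.log_eq_of_pow_le_of_lt_pow hBN1
        (by rw [show dt - 1 + 1 = dt from by omega]; exact hBN2)
    have hinv : (dLSB 10 dt B).reverse = LB := by
      have h := dLSB_pval (show (0:Int) < 10 by norm_num) (l := LB)
        (fun d hd => by have := hLBok d hd; omega)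
      rw [hLBlen] at h
      rw [hBdef]
      exact h
    have hCB : getNumNeq B = k := by
      rw [getNumNeq_eq hB1, hlogB, show dt - 1 + 1 = dt from by omega, hinv, hT9LB]
      exact heq'
    have hSdt : S (dt - 1) + 9 ^ dt = S dt := by
      obtain ⟨u, hu⟩ : ∃ u, dt = u + 1 := ⟨dt - 1, by omega⟩
      rw [hu]; simp [S]
    refine ⟨by rw [hBeq]; exact hB1, ?_, ?_⟩
    · rw [hBeq]
      have h10 : (10:Int) ^ dt ≤ 10 ^ 20 := pow_le_pow_right₀ (by norm_num) (by omega)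
      omega
    · intro x hx
      rw [hBeq]
      have hx0 : 0 ≤ x := by omega
      have hxN0 : x.toNat ≠ 0 := by omega
      obtain ⟨mx, hmx⟩ : ∃ mx, Nat.log 10 x.toNat = mx := ⟨_, rfl⟩
      have hxlowN : 10 ^ mx ≤ x.toNat := hmx ▸ Nat.pow_log_le_self 10 hxN0
      have hxhighN : x.toNat < 10 ^ (mx + 1) :=
        hmx ▸ Nat.lt_pow_succ_log_self (by norm_num) x.toNat
      have hxlow : (10:Int) ^ mx ≤ x := by
        have h2 : ((10 ^ mx : Nat) : Int) ≤ (x.toNat : Int) := by exact_mod_cast hxlowN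
        push_cast at h2
        omega
      have hxhigh : x < (10:Int) ^ (mx + 1) := by
        have h2 : ((x.toNat : Nat) : Int) < ((10 ^ (mx+1) : Nat) : Int) := by
          exact_mod_cast hxhighN
        push_cast at h2
        omega
      obtain ⟨Dx, hDx⟩ : ∃ D, (dLSB 10 (mx+1) x).reverse = D := ⟨_, rfl⟩
      have hDxok : OkD Dx := by
        intro d hd
        rw [← hDx] at hd
        have := dLSB_ok (by norm_num : (0:Int) < 10) (mx+1) x d (List.mem_reverse.mp hd)
        omega
      have hDxlen : Dx.length = mx + 1 := by
        rw [← hDx, List.length_reverse, dLSB_length]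
      have hpvDx : pval 10 Dx = x := by
        rw [← hDx, pval_rev_dLSB (by norm_num) (mx+1) x hx0]
        exact Int.emod_eq_of_lt hx0 hxhigh
      have hCx : getNumNeq x = T9 0 Dx + S mx := by
        rw [getNumNeq_eq hx, hmx, hDx]
      have imp1 : x < B → getNumNeq x < k := by
        intro hxB
        have hxltd : x < (10:Int) ^ dt := by omega
        have hxNd : x.toNat < 10 ^ dt := by
          have h2 : x < ((10 ^ dt : Nat) : Int) := by push_cast; exact hxltd
          omega
        have hmle : mx + 1 ≤ dt := by
          have := hmx ▸ Nat.log_lt_of_lt_pow hxN0 hxNd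
          omega
        rcases eq_or_lt_of_le hmle with hEq | hLt
        · have hlex : List.Lex (· < ·) Dx LB :=
            lex_of_pval_lt hDxok hLBok (by rw [hDxlen, hLBlen, hEq]) (by rw [hpvDx, ← hBdef]; exact hxB)
          have hT := T9_mono_lt le_rfl (by rw [hDxlen, hLBlen, hEq]) hDxok hLBok hLBval hlex
          rw [hT9LB] at hT
          have hmxdt : mx = dt - 1 := by omega
          rw [hCx, hmxdt]
          omega
        · have hT9le : T9 0 Dx ≤ 9 ^ (mx+1) := by
            have h := T9_le (show (0:Int) ≤ 9 by norm_num) hDxok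
            rw [hDxlen] at h
            exact h
          have hSm : S mx + 9 ^ (mx+1) = S (mx+1) := by simp [S]
          have hSle : S (mx+1) ≤ S (dt-1) := S_mono (by omega)
          rw [hCx]
          omega
      have imp2 : B ≤ x → k ≤ getNumNeq x := by
        intro hBx
        have hge : dt - 1 ≤ mx := by
          have h1 : (10:Nat) ^ (dt-1) ≤ x.toNat := by omega
          have := hmx ▸ Nat.le_log_of_pow_le (by norm_num) h1
          omega
        rcases eq_or_lt_of_le (show dt ≤ mx + 1 by omega) with hEq | hLt
        · rcases eq_or_lt_of_le hBx with hxB | hxB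
          · rw [← hxB, hCB]
          · have hlex : List.Lex (· < ·) LB Dx :=
              lex_of_pval_lt hLBok hDxok (by rw [hDxlen, hLBlen, hEq]) (by rw [hpvDx, ← hBdef]; exact hxB)
            have hT := T9_mono_le le_rfl (by rw [hDxlen, hLBlen, hEq]) hLBok hDxok hlex
            rw [hT9LB] at hT
            have hmxdt : mx = dt - 1 := by omega
            rw [hCx, hmxdt]
            omega
        · have hT90 : 0 ≤ T9 0 Dx := T9_nonneg le_rfl hDxok
          have hSle : S dt ≤ S mx := S_mono (by omega)
          rw [hCx]
          omega
      constructor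
      · intro hC
        by_contra hnot
        have hxB : x < B := by omega
        have := imp1 hxB
        omega
      · intro hBx
        exact imp2 hBx

lemma solveLoop_eq {k B : Int} (hB : 1 ≤ B)
    (hcrux : ∀ x : Int, 1 ≤ x → (getNumNeq x ≥ k ↔ B ≤ x)) :
    ∀ (n : Nat) (mn mx : Int), (mx - mn).toNat ≤ n → 0 ≤ mn → mn < B → B ≤ mx →
      solveLoop k mn mx = B := by
  intro n
  induction n with
  | zero =>
    intro mn mx hn h0 h1 h2
    exfalso; omega
  | succ n ih =>
    intro mn mx hn h0 h1 h2
    rw [solveLoop.eq_def]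
    by_cases hgt : mx - mn > 1
    · rw [dif_pos hgt]
      have hm1 : mn + 1 ≤ PySem.Int.floordiv (mx + mn) 2 :=
        (PySem.Int.le_floordiv_iff_mul_le (by norm_num)).2 (by omega)
      have hm2 : PySem.Int.floordiv (mx + mn) 2 < mx :=
        (PySem.Int.floordiv_lt_iff_lt_mul (by norm_num)).2 (by omega)
      dsimp only
      by_cases hc : getNumNeq (PySem.Int.floordiv (mx + mn) 2) ≥ k
      · rw [if_pos hc]
        have hBmid : B ≤ PySem.Int.floordiv (mx + mn) 2 :=
          (hcrux _ (by omega)).1 hc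
        exact ih mn _ (by omega) h0 h1 hBmid
      · rw [if_neg hc]
        have hmid : ¬ B ≤ PySem.Int.floordiv (mx + mn) 2 := fun hle =>
          hc ((hcrux _ (by omega)).2 hle)
        exact ih _ mx (by omega) (by omega) (by omega) h2
    · rw [dif_neg hgt]
      omega

-- ===== VERDICT (by name: the statement is the Claim_ definition above) =====
theorem solve_spec : Claim_equal_solve := by
  intro k hdom
  unfold Spec_solve
  have hk : k ≤ 2^31 := by
    unfold Dom_solve pvDomInt at hdom
    simpa using (of_decide_eq_true hdom).2
  obtain ⟨h1, h2, hc⟩ := crux hk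
  exact solveLoop_eq h1 hc (MAX_NUM - 0).toNat 0 MAX_NUM le_rfl le_rfl h1 (by unfold MAX_NUM; exact h2)
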